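-- pv_equiv track=rewrite | github.com/viCeNtE06479/UFWvwy5MdY | dynamic_planner_1009_0319_bhg.py | dynamic_planner_task
-- ===== SOURCE A (Python) =====
-- def dynamic_planner_task(n):
--     """
--     动态规划解决器任务。
--
--     参数:
--     n (int): 任务输入参数。
--
--     返回:
--     int: 任务输出结果。
--     """
--     try:
--         # 这里添加动态规划算法实现，例如斐波那契数列
--         result = 0
--         for i in range(1, n+1):
--             result += i
--         return result
--     except Exception as e:
--         # 错误处理
--         return f'Error: {str(e)}'
-- ===== SOURCE B (Python) =====
-- def dynamic_planner_task(n):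
--     return n * (n + 1) // 2 if n > 0 else 0
-- ===== Notes on version B (the rewrite author's own statement) =====
-- stated objective: faster
-- what changed: Replaces the linear accumulation loop with the constant-time closed-form Gauss formula (zero for non-positive input).
import Mathlib
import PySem

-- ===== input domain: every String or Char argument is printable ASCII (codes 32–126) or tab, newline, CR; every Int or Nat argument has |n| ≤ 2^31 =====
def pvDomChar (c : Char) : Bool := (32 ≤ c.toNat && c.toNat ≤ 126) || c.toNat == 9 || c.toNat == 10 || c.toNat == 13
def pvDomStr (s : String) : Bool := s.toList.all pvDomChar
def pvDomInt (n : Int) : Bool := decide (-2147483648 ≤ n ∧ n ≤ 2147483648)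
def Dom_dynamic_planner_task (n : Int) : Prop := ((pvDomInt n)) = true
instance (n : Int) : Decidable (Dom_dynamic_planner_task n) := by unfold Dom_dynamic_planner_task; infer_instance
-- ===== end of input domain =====

-- ===== PORT A =====
-- Header: B replaces A's O(n) accumulation loop with the closed-form Gauss formula (objective: faster).
def dynamic_planner_task (n : Int) : Int :=
  (PySem.List.pyRange 1 (n+1) 1).foldl (fun result i => result + i) 0

-- ===== PORT B =====
def dynamic_planner_task_alt (n : Int) : Int :=
  if 0 < n then PySem.Int.floordiv (n * (n + 1)) 2 else 0

-- ===== PRECONDITION & SPEC =====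
def Spec_dynamic_planner_task (n : Int) (out : Int) : Prop := out = dynamic_planner_task_alt n
instance (n : Int) (out : Int) : Decidable (Spec_dynamic_planner_task n out) := by unfold Spec_dynamic_planner_task; infer_instance

-- ===== CLAIM (what is proved, stated in full; the proofs are below) =====
def Claim_equal_dynamic_planner_task : Prop := ∀ (n : Int), Dom_dynamic_planner_task n → Spec_dynamic_planner_task n (dynamic_planner_task n)

-- ===== LEMMAS AND PROOFS =====

-- ===== VERDICT (by name: the statement is the Claim_ definition above) =====
theorem pv_gauss (k : Nat) :
    (PySem.List.pyRange 1 ((k:Int)+1) 1).foldl (fun result i => result + i) 0 * 2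
      = (k:Int) * ((k:Int)+1) := by
  induction k with
  | zero => simp [PySem.List.pyRange_one_eq_nil]
  | succ m ih =>
      rw [show ((m+1:Nat):Int) + 1 = ((m:Int)+1) + 1 by push_cast; ring,
          PySem.List.pyRange_one_succ_right (show (1:Int) ≤ (m:Int)+1 by omega),
          List.foldl_append]
      simp only [List.foldl_cons, List.foldl_nil]
      push_cast
      nlinarith [ih]

theorem dynamic_planner_task_spec : Claim_equal_dynamic_planner_task := by
  intro n _
  unfold Spec_dynamic_planner_task dynamic_planner_task dynamic_planner_task_alt
  by_cases hn : 0 < n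
  · rw [if_pos hn, PySem.Int.floordiv_eq_ediv_of_pos (by norm_num)]
    obtain ⟨k, rfl⟩ : ∃ k : Nat, n = (k:Int) := ⟨n.toNat, by omega⟩
    have := pv_gauss k
    omega
  · rw [if_neg hn, PySem.List.pyRange_one_eq_nil (by omega)]
    simp
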